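-- pv_equiv track=rewrite | github.com/JoseBlanca/franklin | biolib/src/biolib/sam.py | _group_alleles
-- ===== SOURCE A (Python) =====
-- def _group_alleles(alleles, quals):
--     '''It converts the list of secs and quals into dicts with the allele as key.
--     allele_group group alleles and counts them and quality_group gives
--     the quality for each allele'''
--     alleles_dict = {}
--     qual_dict = {}
--     for index, allele in enumerate(alleles):
--         allele = allele.upper()
--         if allele not in alleles_dict:
--             alleles_dict[allele] = 0
--             qual_dict[allele] = []
--         alleles_dict[allele] += 1
--         qual_dict[allele].append(quals[index])
--     return alleles_dict, qual_dict
-- ===== SOURCE B (Python) =====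
-- def _group_alleles(alleles, quals):
--     '''It converts the list of secs and quals into dicts with the allele as key.
--     allele_group group alleles and counts them and quality_group gives
--     the quality for each allele'''
--     pairs = [(allele.upper(), quals[index]) for index, allele in enumerate(alleles)]
--     keys = []
--     for key, _qual in pairs:
--         if key not in keys:
--             keys.append(key)
--     qual_dict = {key: [qual for key2, qual in pairs if key2 == key] for key in keys}
--     alleles_dict = {key: len(quals_) for key, quals_ in qual_dict.items()}
--     return alleles_dict, qual_dict
-- ===== Notes on version B (the rewrite author's own statement) =====
-- stated objective: alternative
-- what changed: B replaces A's single accumulating pass (membership branch, counter and list maintained per step) by staged passes: it materializes the uppercased (allele, qual) pairs, dedupes the keys in first-appearance order, then builds each allele's quality list by a separate filtering scan of the pairs and derives the counts as the lengths of those lists.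
import Mathlib
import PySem

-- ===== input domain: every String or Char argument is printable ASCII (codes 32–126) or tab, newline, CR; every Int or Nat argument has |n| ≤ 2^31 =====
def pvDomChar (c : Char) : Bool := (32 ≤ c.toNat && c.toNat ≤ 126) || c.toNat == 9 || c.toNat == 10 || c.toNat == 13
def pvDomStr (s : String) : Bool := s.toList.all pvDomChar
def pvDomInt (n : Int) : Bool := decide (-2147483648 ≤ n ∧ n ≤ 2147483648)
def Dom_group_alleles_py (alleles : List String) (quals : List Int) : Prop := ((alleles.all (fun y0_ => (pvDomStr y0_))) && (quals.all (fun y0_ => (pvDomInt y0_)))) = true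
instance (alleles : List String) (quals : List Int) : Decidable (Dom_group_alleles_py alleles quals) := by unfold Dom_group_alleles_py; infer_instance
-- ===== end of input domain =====

-- B regroups by staged passes — uppercased pairs, deduped keys, then one filtering
-- scan of the pairs per distinct key — instead of A's single accumulating pass
-- (objective: alternative; not faster, O(n*k) vs O(n)).


-- ===== PORT A =====
-- the body of A's for-loop: uppercase, first-seen initialisation, count += 1, append quals[index]
def groupStepA (quals : List Int)
    (st : PySem.Dict String Int × PySem.Dict String (List Int)) (p : Int × String) :
    PySem.Dict String Int × PySem.Dict String (List Int) :=
  let allele := PySem.Str.upper p.2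
  let st' := if !(st.1.contains allele) then (st.1.insert allele 0, st.2.insert allele []) else st
  (st'.1.modify allele 0 (· + 1), st'.2.modify allele [] (· ++ [PySem.List.pyGetD quals p.1 0]))

def group_alleles_py (alleles : List String) (quals : List Int) :
    (List (String × Int)) × (List (String × List Int)) :=
  let st := (PySem.List.enumerate alleles).foldl (groupStepA quals)
    (PySem.Dict.empty, PySem.Dict.empty)
  (st.1.items, st.2.items)

-- ===== PORT B =====
-- B's staged passes: pairs comprehension, key-dedup loop, per-key filtering scans,
-- counts as the lengths of the collected lists
def group_alleles_py_alt (alleles : List String) (quals : List Int) :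
    (List (String × Int)) × (List (String × List Int)) :=
  let pairs := (PySem.List.enumerate alleles).map
    (fun p => (PySem.Str.upper p.2, PySem.List.pyGetD quals p.1 0))
  let keys := pairs.foldl (fun ks p => if ks.contains p.1 then ks else ks ++ [p.1]) []
  let qd := keys.map (fun k => (k, (pairs.filter (fun p => p.1 == k)).map (·.2)))
  let ad := qd.map (fun p => (p.1, (p.2.length : Int)))
  (ad, qd)

-- ===== PRECONDITION & SPEC =====
-- A evaluates quals[index] for every index of alleles: it raises IndexError iff quals is shorter than alleles (B raises there too).
def Pre_group_alleles_py (alleles : List String) (quals : List Int) : Prop :=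
  alleles.length ≤ quals.length
instance (alleles : List String) (quals : List Int) : Decidable (Pre_group_alleles_py alleles quals) := by unfold Pre_group_alleles_py; infer_instance

def pvWitness_group_alleles_py : List String × List Int := (["a", "A", "t"], [10, 20, 30])

def Spec_group_alleles_py (alleles : List String) (quals : List Int) (out : (List (String × Int)) × (List (String × List Int))) : Prop := out = group_alleles_py_alt alleles quals
instance (alleles : List String) (quals : List Int) (out : (List (String × Int)) × (List (String × List Int))) : Decidable (Spec_group_alleles_py alleles quals out) := by unfold Spec_group_alleles_py; infer_instance

-- ===== CLAIM (what is proved, stated in full; the proofs are below) =====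
def Claim_equal_group_alleles_py : Prop := ∀ (alleles : List String) (quals : List Int), Dom_group_alleles_py alleles quals → Pre_group_alleles_py alleles quals → Spec_group_alleles_py alleles quals (group_alleles_py alleles quals)

-- ===== LEMMAS AND PROOFS =====

-- A's step, re-parameterised by the (uppercased allele, qual) pair instead of (index, allele)
def groupStepA' (st : PySem.Dict String Int × PySem.Dict String (List Int)) (p : String × Int) :
    PySem.Dict String Int × PySem.Dict String (List Int) :=
  let st' := if !(st.1.contains p.1) then (st.1.insert p.1 0, st.2.insert p.1 []) else st
  (st'.1.modify p.1 0 (· + 1), st'.2.modify p.1 [] (· ++ [p.2]))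

-- the uppercased pairs comprehension over enumerate is a map over the zip (quals long enough)
theorem pairs_eq_zip :
    ∀ (as : List String) (qs pre : List Int), as.length ≤ qs.length →
      (PySem.List.enumerate as (pre.length : Int)).map
        (fun p => (PySem.Str.upper p.2, PySem.List.pyGetD (pre ++ qs) p.1 0))
      = (as.zip qs).map (fun p => (PySem.Str.upper p.1, p.2)) := by
  intro as
  induction as with
  | nil => intro qs pre _; simp [PySem.List.enumerate]
  | cons a as ih =>
    intro qs pre h
    cases qs with
    | nil => simp at h
    | cons q qs =>
      rw [PySem.List.enumerate_cons, List.zip_cons_cons, List.map_cons, List.map_cons]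
      have hget : PySem.List.pyGetD (pre ++ q :: qs) (pre.length : Int) 0 = q := by
        simp [PySem.List.pyGetD_natCast, List.getD]
      have hlen : (pre.length : Int) + 1 = ((pre ++ [q]).length : Int) := by simp
      have happ : pre ++ q :: qs = (pre ++ [q]) ++ qs := by simp
      rw [hget, hlen, happ, ih qs (pre ++ [q]) (by simpa using h)]

-- a fold over enumerate that only uses the index through quals[index] is a fold over the zip
theorem foldl_enumerate_pyGetD {σ : Type} (g : σ → String × Int → σ) :
    ∀ (as : List String) (qs pre : List Int) (st : σ), as.length ≤ qs.length →
      (PySem.List.enumerate as (pre.length : Int)).foldl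
        (fun st p => g st (PySem.Str.upper p.2, PySem.List.pyGetD (pre ++ qs) p.1 0)) st
      = ((as.zip qs).map (fun p => (PySem.Str.upper p.1, p.2))).foldl g st := by
  intro as qs pre st h
  rw [← pairs_eq_zip as qs pre h, List.foldl_map]

theorem groupStepA_eq (quals : List Int) :
    groupStepA quals
    = fun st p => groupStepA' st (PySem.Str.upper p.2, PySem.List.pyGetD quals p.1 0) := rfl

-- the paired fold splits into two independent modify-folds, given that the two dicts
-- always contain the same keys
theorem pair_fold (ps : List (String × Int)) :
    ∀ (ad : PySem.Dict String Int) (qd : PySem.Dict String (List Int)),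
      (∀ k, ad.contains k = qd.contains k) →
      ps.foldl groupStepA' (ad, qd)
      = (ps.foldl (fun d p => d.modify p.1 0 (· + 1)) ad,
         ps.foldl (fun d p => d.modify p.1 [] (· ++ [p.2])) qd) := by
  induction ps with
  | nil => intro ad qd _; rfl
  | cons p ps ih =>
    intro ad qd hc
    rw [List.foldl_cons, List.foldl_cons, List.foldl_cons]
    have hstep : groupStepA' (ad, qd) p
        = (ad.modify p.1 0 (· + 1), qd.modify p.1 [] (· ++ [p.2])) := by
      by_cases h : ad.contains p.1
      · simp [groupStepA', h]
      · have h' : qd.contains p.1 = false := by rw [← hc]; simpa using h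
        simp [groupStepA', h, PySem.Dict.modify, PySem.Dict.getD_insert_self,
          PySem.Dict.insert_insert_self, PySem.Dict.getD_of_not_contains _ _ h',
          PySem.Dict.getD_of_not_contains _ _ (by simpa using h : ad.contains p.1 = false)]
    rw [hstep]
    exact ih _ _ (by
      intro k
      rw [PySem.Dict.contains_modify, PySem.Dict.contains_modify, hc k])

-- the count at key k after A's counting fold: previous value plus the matching pairs
theorem getD_fold_count (l : List (String × Int)) :
    ∀ (d : PySem.Dict String Int) (k : String),
      (l.foldl (fun d p => d.modify p.1 0 (· + 1)) d).getD k 0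
      = d.getD k 0 + (l.countP (fun p => p.1 == k) : Int) := by
  induction l with
  | nil => intro d k; simp
  | cons p l ih =>
    intro d k
    rw [List.foldl_cons, ih, PySem.Dict.getD_modify, List.countP_cons]
    by_cases h : k = p.1
    · simp [h]; omega
    · simp [h, Ne.symm h]

theorem group_alleles_py_spec : Claim_equal_group_alleles_py := by
  intro alleles quals _ hpre
  unfold Spec_group_alleles_py group_alleles_py group_alleles_py_alt
  dsimp only
  -- name B's pairs and rewrite them as a map over the zip
  have hpairs := pairs_eq_zip alleles quals [] hpre
  simp only [List.length_nil, Nat.cast_zero, List.nil_append] at hpairs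
  rw [hpairs]
  set zs := (alleles.zip quals).map (fun p => (PySem.Str.upper p.1, p.2)) with hzs
  -- A's fold over enumerate is the fold of groupStepA' over zs
  have key := foldl_enumerate_pyGetD groupStepA' alleles quals []
    ((PySem.Dict.empty : PySem.Dict String Int), (PySem.Dict.empty : PySem.Dict String (List Int))) hpre
  simp only [List.length_nil, Nat.cast_zero, List.nil_append] at key
  rw [groupStepA_eq, key, pair_fold _ _ _ (fun k => rfl)]
  -- B's key-dedup loop is Set.ofList of the first components
  have hkeysB : zs.foldl (fun ks p => if ks.contains p.1 then ks else ks ++ [p.1]) []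
      = PySem.Set.ofList (zs.map (·.1)) := by
    rw [← PySem.Set.update_nil_left, PySem.Set.update_map_eq_foldl_add]
    rfl
  rw [hkeysB]
  -- A's dicts have Nodup keys equal to the same set
  have hndA := PySem.Dict.nodup_keys_foldl_modify_key zs
    (fun p => p.1) (0 : Int) (fun _ _ v => v + 1) PySem.Dict.empty PySem.Dict.nodup_keys_empty
  have hndB := PySem.Dict.nodup_keys_foldl_modify_key zs
    (fun p => p.1) ([] : List Int) (fun _ p v => v ++ [p.2]) PySem.Dict.empty PySem.Dict.nodup_keys_empty
  have hkeysA := PySem.Dict.keys_foldl_modify_key zs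
    (fun p => p.1) (0 : Int) (fun _ _ v => v + 1) PySem.Dict.empty
  have hkeysQ := PySem.Dict.keys_foldl_modify_key zs
    (fun p => p.1) ([] : List Int) (fun _ p v => v ++ [p.2]) PySem.Dict.empty
  simp only [PySem.Dict.keys_empty, PySem.Set.update_nil_left] at hkeysA hkeysQ
  -- per-key value of the appending fold
  have hval : ∀ k, (zs.foldl (fun d p => d.modify p.1 [] (· ++ [p.2])) PySem.Dict.empty).getD k []
      = (zs.filter (fun p => p.1 == k)).map (·.2) := by
    intro k
    rw [PySem.Dict.getD_foldl_modify_append]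
    simp
  refine Prod.ext ?_ ?_
  · dsimp only
    rw [PySem.Dict.items_eq_map_keys _ hndA 0, hkeysA]
    simp only [List.map_map]
    refine List.map_congr_left (fun k _ => ?_)
    simp only [Function.comp_apply]
    rw [getD_fold_count]
    simp [List.countP_eq_length_filter]
  · dsimp only
    rw [PySem.Dict.items_eq_map_keys _ hndB [], hkeysQ]
    exact List.map_congr_left (fun k _ => by rw [hval])
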